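-- pv_equiv track=rewrite | github.com/bioliyezhang/RESC_paper | gRNA_Utail/gRNA_Utail_length.py | parse_CIGAR_Softclip
-- ===== SOURCE A (Python) =====
-- def parse_CIGAR_Softclip(CIGAR):
--     start=''
--     for ele in CIGAR:
--         if ele.isdigit():
--             start+=ele
--         else:
--             if ele=='S':
--                 return 'SoftClip',int(start)
--             else:
--                 return 'Not',0
-- ===== SOURCE B (Python) =====
-- import re
--
-- def parse_CIGAR_Softclip(CIGAR):
--     m = re.match(r'([0-9]*)([^0-9])', CIGAR)
--     if m is None:
--         return None
--     if m.group(2) == 'S':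
--         return 'SoftClip', int(m.group(1))
--     return 'Not', 0
-- ===== Notes on version B (the rewrite author's own statement) =====
-- stated objective: idiomatic
-- what changed: Replaces the character-by-character accumulation loop with a single regex match '([0-9]*)([^0-9])' that captures the leading digit run and the first operator character in one call, then branches on the captured operator.
-- outside the precondition, e.g. on parse_CIGAR_Softclip('123'): A returns None, B returns None; on parse_CIGAR_Softclip(''): A returns None, B returns None; on parse_CIGAR_Softclip('S'): A raises ValueError, B raises ValueError
import Mathlib
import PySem

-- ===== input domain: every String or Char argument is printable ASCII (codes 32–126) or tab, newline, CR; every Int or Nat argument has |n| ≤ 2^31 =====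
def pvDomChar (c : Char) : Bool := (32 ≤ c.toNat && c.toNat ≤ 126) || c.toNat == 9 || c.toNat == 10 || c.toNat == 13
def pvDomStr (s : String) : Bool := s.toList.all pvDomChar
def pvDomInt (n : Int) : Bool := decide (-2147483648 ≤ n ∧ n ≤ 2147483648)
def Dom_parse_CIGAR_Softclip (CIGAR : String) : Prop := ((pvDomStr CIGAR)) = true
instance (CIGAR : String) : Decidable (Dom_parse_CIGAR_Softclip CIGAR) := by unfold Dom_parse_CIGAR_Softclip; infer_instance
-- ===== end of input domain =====

-- B replaces A's explicit digit-accumulation loop by one regex match re.match('([0-9]*)([^0-9])', CIGAR)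
-- (ported as takeWhile/dropWhile of the leading digit run) and branches on the captured operator; objective: idiomatic.

-- ===== PORT A =====
-- the for-loop of A, carrying the accumulated digit string `start` (as its char list);
-- falling off the loop is Python's implicit `return None`, and int('') on a leading 'S' is a
-- ValueError — both outside Pre_, where the port returns the junk value ("", 0) / .getD 0.
def pvLoopA : List Char → List Char → String × Int
  | [], _ => ("", 0)
  | ele :: rest, start =>
    if PySem.Chars.isdigit ele then
      pvLoopA rest (start ++ [ele])
    else
      if ele = 'S' then ("SoftClip", (PySem.Int.ofChars? start).getD 0)
      else ("Not", 0)

def parse_CIGAR_Softclip (CIGAR : String) : String × Int :=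
  pvLoopA CIGAR.toList []

-- ===== PORT B =====
-- re.match('([0-9]*)([^0-9])', CIGAR), ported by hand (exact): group 1 is the maximal leading
-- run of [0-9], group 2 the single following non-digit; no match (empty or all-digit string) is
-- Python's `return None`, outside Pre_, where the port returns the junk value ("", 0).
def parse_CIGAR_Softclip_alt (CIGAR : String) : String × Int :=
  let isDig : Char → Bool := fun c => decide ('0' ≤ c) && decide (c ≤ '9')
  match CIGAR.toList.dropWhile isDig with
  | [] => ("", 0)
  | c :: _ =>
    if c = 'S' then ("SoftClip", (PySem.Int.ofChars? (CIGAR.toList.takeWhile isDig)).getD 0)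
    else ("Not", 0)

-- ===== PRECONDITION & SPEC =====
-- Pre_ excludes exactly the inputs where Python A returns no String × Int value: empty or
-- all-digit strings (A falls off the loop and returns None) and strings starting with 'S'
-- (int('') raises ValueError); B behaves identically (returns None / raises) there.
def Pre_parse_CIGAR_Softclip (CIGAR : String) : Prop :=
  (CIGAR.toList.any (fun c => !PySem.Chars.isdigit c)) = true ∧ CIGAR.toList.head? ≠ some 'S'
instance (CIGAR : String) : Decidable (Pre_parse_CIGAR_Softclip CIGAR) := by
  unfold Pre_parse_CIGAR_Softclip; infer_instance

def pvWitness_parse_CIGAR_Softclip : String := "12S88M"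

def Spec_parse_CIGAR_Softclip (CIGAR : String) (out : String × Int) : Prop := out = parse_CIGAR_Softclip_alt CIGAR
instance (CIGAR : String) (out : String × Int) : Decidable (Spec_parse_CIGAR_Softclip CIGAR out) := by unfold Spec_parse_CIGAR_Softclip; infer_instance

-- ===== CLAIM (what is proved, stated in full; the proofs are below) =====
def Claim_equal_parse_CIGAR_Softclip : Prop := ∀ (CIGAR : String), Dom_parse_CIGAR_Softclip CIGAR → Pre_parse_CIGAR_Softclip CIGAR → Spec_parse_CIGAR_Softclip CIGAR (parse_CIGAR_Softclip CIGAR)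

-- ===== LEMMAS AND PROOFS =====

-- Loop invariant: A's loop over `l` with accumulated digits `start` computes B's
-- "split at the first non-digit" answer with `start` prepended to the digit run.
theorem pvLoopA_eq (l : List Char) (start : List Char) :
    pvLoopA l start =
      (match l.dropWhile PySem.Chars.isdigit with
       | [] => ("", 0)
       | c :: _ =>
         if c = 'S' then
           ("SoftClip", (PySem.Int.ofChars? (start ++ l.takeWhile PySem.Chars.isdigit)).getD 0)
         else ("Not", 0)) := by
  induction l generalizing start with
  | nil => simp [pvLoopA]
  | cons ele rest ih =>
    by_cases h : PySem.Chars.isdigit ele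
    · simp [pvLoopA, h, ih]
    · simp [pvLoopA, h]

-- ===== VERDICT (by name: the statement is the Claim_ definition above) =====
theorem parse_CIGAR_Softclip_spec : Claim_equal_parse_CIGAR_Softclip := by
  intro CIGAR _ _
  unfold Spec_parse_CIGAR_Softclip parse_CIGAR_Softclip parse_CIGAR_Softclip_alt
  rw [pvLoopA_eq]
  rfl
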